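-- pv_equiv track=rewrite | github.com/Wilson008/XtextRepoSurvey | collect_extensions.py | extract_extension_from_mwe2
-- ===== SOURCE A (Python) =====
-- def extract_extension_from_mwe2(content):
--     lines = content.split('\n')
--     for line in lines:
--         if line.strip().startswith('fileExtensions'):
--             parts = line.split('=')
--             if len(parts) > 1:
--                 extension = parts[1].strip().strip('"')
--                 return extension
--     return None
-- ===== SOURCE B (Python) =====
-- def extract_extension_from_mwe2(content):
--     # Single-cursor scanner: no splitting into a line list and no per-line split('=');
--     # at each line start skip indentation, match the keyword, then walk to the '=' and
--     # capture up to the next '=' or end of line.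
--     s = content
--     n = len(s)
--     i = 0  # start of the current line
--     while True:
--         j = i
--         while j < n and s[j] in ' \t\r':
--             j += 1
--         if s.startswith('fileExtensions', j):
--             k = j + 14
--             while k < n and s[k] not in '=\n':
--                 k += 1
--             if k < n and s[k] == '=':
--                 v = k + 1
--                 while v < n and s[v] not in '=\n':
--                     v += 1
--                 return s[k + 1:v].strip().strip('"')
--         nl = s.find('\n', i)
--         if nl == -1:
--             return None
--         i = nl + 1
-- ===== Notes on version B (the rewrite author's own statement) =====
-- stated objective: alternative
-- what changed: Replaces split-into-lines plus per-line strip/startswith/split with a single cursor scan over the string that skips indentation at each line start, matches the keyword in place, and walks directly to the equals sign and the value end.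
import Mathlib
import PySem

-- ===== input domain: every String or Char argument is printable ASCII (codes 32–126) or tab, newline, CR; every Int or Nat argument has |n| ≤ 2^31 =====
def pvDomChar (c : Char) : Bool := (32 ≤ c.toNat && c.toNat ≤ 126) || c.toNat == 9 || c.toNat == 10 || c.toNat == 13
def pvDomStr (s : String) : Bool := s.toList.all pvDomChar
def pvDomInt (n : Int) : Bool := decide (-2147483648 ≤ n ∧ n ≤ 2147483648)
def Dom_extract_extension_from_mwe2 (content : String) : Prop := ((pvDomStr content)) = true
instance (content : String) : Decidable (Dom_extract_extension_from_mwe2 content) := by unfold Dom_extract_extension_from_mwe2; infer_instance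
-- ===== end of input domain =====

-- B replaces A's split-into-lines + per-line strip/startswith/split by a single
-- cursor scan over the characters (alternative decomposition, same asymptotic cost).


-- ===== PORT A =====
-- the for-loop over content.split('\n'); strings are carried as List Char via PySem.Chars
def goA : List (List Char) → Option (List Char)
  | [] => none
  | line :: rest =>
    if PySem.Chars.startswith (PySem.Chars.strip line) "fileExtensions".toList then
      let parts := PySem.Chars.splitOn line ['=']
      if parts.length > 1 then
        some (PySem.Chars.stripChars (PySem.Chars.strip parts[1]!) ['"'])
      else goA rest
    else goA rest

def extract_extension_from_mwe2 (content : String) : Option String :=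
  (goA (PySem.Chars.splitOn content.toList ['\n'])).map String.ofList

-- ===== PORT B =====
-- Source B's cursor positions i/j/k/v are represented by the corresponding suffix of the
-- character list; each inner while-loop is the matching dropWhile/takeWhile (exact).
def wsB (c : Char) : Bool := c == ' ' || c == '\t' || c == '\r'
def stopB (c : Char) : Bool := c == '=' || c == '\n'

-- the body of one iteration of Source B's outer loop up to the possible 'return'
def tryLineB (cs : List Char) : Option (List Char) :=
  -- j-loop = the dropWhile; s.startswith(..., j) = the isPrefixOf; k-loop/v-loop below
  if "fileExtensions".toList.isPrefixOf (cs.dropWhile wsB) then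
    match ((cs.dropWhile wsB).drop 14).dropWhile (fun c => !stopB c) with  -- the k-loop
    | '=' :: after => some (after.takeWhile (fun c => !stopB c))  -- v-loop and s[k+1:v]
    | _ => none
  else none

-- the outer while-loop: advance to just after the next '\n' (s.find('\n', i))
def scanB (cs : List Char) : Option (List Char) :=
  match tryLineB cs with
  | some v => some v
  | none =>
    match h : cs.dropWhile (fun c => c != '\n') with
    | [] => none
    | _ :: rest => scanB rest
termination_by cs.length
decreasing_by
  have h1 := List.length_dropWhile_le (fun c => c != '\n') cs
  rw [h] at h1; simp at h1 ⊢; omega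

def extract_extension_from_mwe2_alt (content : String) : Option String :=
  match scanB content.toList with
  | some v => some (String.ofList (PySem.Chars.stripChars (PySem.Chars.strip v) ['"']))
  | none => none

-- ===== PRECONDITION & SPEC =====
def Spec_extract_extension_from_mwe2 (content : String) (out : Option String) : Prop := out = extract_extension_from_mwe2_alt content
instance (content : String) (out : Option String) : Decidable (Spec_extract_extension_from_mwe2 content out) := by unfold Spec_extract_extension_from_mwe2; infer_instance

-- ===== CLAIM (what is proved, stated in full; the proofs are below) =====
def Claim_equal_extract_extension_from_mwe2 : Prop := ∀ (content : String), Dom_extract_extension_from_mwe2 content → Spec_extract_extension_from_mwe2 content (extract_extension_from_mwe2 content)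

-- ===== LEMMAS AND PROOFS =====

-- recursive characterisation of Python str.split(sep) for a one-character separator
def splitC (sep : Char) (cs : List Char) : List (List Char) :=
  cs.takeWhile (fun c => c != sep) ::
    (match h : cs.dropWhile (fun c => c != sep) with
     | [] => []
     | _ :: rest => splitC sep rest)
termination_by cs.length
decreasing_by
  have h1 := List.length_dropWhile_le (fun c => c != sep) cs
  rw [h] at h1; simp at h1 ⊢; omega

theorem splitC_of_dropWhile_nil (sep : Char) (cs : List Char)
    (h : cs.dropWhile (fun c => c != sep) = []) :
    splitC sep cs = [cs.takeWhile (fun c => c != sep)] := by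
  rw [splitC]
  split <;> simp_all

theorem splitC_of_dropWhile_cons (sep : Char) (cs x rest : List Char)
    (h : cs.dropWhile (fun c => c != sep) = x ++ rest) (hx : x.length = 1) :
    splitC sep cs = cs.takeWhile (fun c => c != sep) :: splitC sep rest := by
  rw [splitC]
  split <;> rename_i heq
  · cases x with
    | nil => simp at hx
    | cons a t => simp_all
  · cases x with
    | nil => simp at hx
    | cons a t =>
      cases t with
      | nil => simp_all
      | cons b u => simp at hx

theorem splitC_cons_shape (sep : Char) (cs : List Char) :
    splitC sep cs = cs.takeWhile (fun c => c != sep) :: (splitC sep cs).tail := by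
  cases hd : cs.dropWhile (fun c => c != sep) with
  | nil => rw [splitC_of_dropWhile_nil sep cs hd]; rfl
  | cons a t =>
    rw [splitC_of_dropWhile_cons sep cs [a] t (by simpa using hd) rfl]; rfl

theorem splitOn_go_spec (sep : Char) (fuel : Nat) :
    ∀ (l cur : List Char) (acc : List (List Char)), l.length < fuel →
      PySem.Chars.splitOn.go [sep] fuel l cur acc =
        acc.reverse ++ ((cur.reverse ++ l.takeWhile (fun c => c != sep)) :: (splitC sep l).tail) := by
  induction fuel with
  | zero => intro l cur acc h; omega
  | succ fuel ih =>
    intro l cur acc h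
    cases l with
    | nil =>
      rw [PySem.Chars.splitOn.go]
      · rw [splitC_of_dropWhile_nil sep [] rfl]
        simp
      · omega
    | cons c rest =>
      rw [PySem.Chars.splitOn.go]
      by_cases hc : sep = c
      · subst hc
        have hpre : [sep].isPrefixOf (sep :: rest) = true := by simp [List.isPrefixOf]
        rw [if_pos hpre]
        have hlen : rest.length < fuel := by simp at h; omega
        rw [ih _ [] _ (by simpa using hlen)]
        have hd : (sep :: rest).dropWhile (fun c => c != sep) = sep :: rest := by
          simp [List.dropWhile_cons]
        rw [splitC_of_dropWhile_cons sep (sep :: rest) [sep] rest (by simpa using hd) rfl]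
        rw [splitC_cons_shape sep rest]
        simp
      · have hcs : (c != sep) = true := by simp [bne]; exact fun he => hc he.symm
        have hpre : [sep].isPrefixOf (c :: rest) = false := by
          simp [List.isPrefixOf, hc]
        rw [if_neg (by simp [hpre])]
        have hlen : rest.length < fuel := by simp at h; omega
        rw [ih _ _ _ hlen]
        have htail : (splitC sep (c :: rest)).tail = (splitC sep rest).tail := by
          have hdd : (c :: rest).dropWhile (fun c => c != sep) = rest.dropWhile (fun c => c != sep) := by
            simp [List.dropWhile_cons, hcs]
          cases hd : rest.dropWhile (fun c => c != sep) with
          | nil =>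
            rw [splitC_of_dropWhile_nil sep (c :: rest) (hdd.trans hd),
              splitC_of_dropWhile_nil sep rest hd]; rfl
          | cons a t =>
            rw [splitC_of_dropWhile_cons sep (c :: rest) [a] t (by simpa using hdd.trans hd) rfl,
              splitC_of_dropWhile_cons sep rest [a] t (by simpa using hd) rfl]; rfl
        rw [htail]
        simp [List.takeWhile_cons, hcs]

theorem splitOn_eq (sep : Char) (cs : List Char) :
    PySem.Chars.splitOn cs [sep] = splitC sep cs := by
  unfold PySem.Chars.splitOn
  rw [splitOn_go_spec sep (cs.length + 1) cs [] [] (by omega)]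
  rw [splitC_cons_shape sep cs]
  simp

-- A's per-line test and value, as one function
def lineA (L : List Char) : Option (List Char) :=
  if PySem.Chars.startswith (PySem.Chars.strip L) "fileExtensions".toList then
    if (PySem.Chars.splitOn L ['=']).length > 1 then
      some (PySem.Chars.splitOn L ['='])[1]!
    else none
  else none

theorem goA_cons (L : List Char) (T : List (List Char)) :
    goA (L :: T) = match lineA L with
      | some p => some (PySem.Chars.stripChars (PySem.Chars.strip p) ['"'])
      | none => goA T := by
  simp only [goA, lineA]
  split_ifs <;> rfl

-- a keyword occurrence cannot straddle the end of the line
theorem prefix_append_stop (pref : List Char) (hn : '\n' ∉ pref) :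
    ∀ (D tail : List Char), '\n' ∉ D → (tail = [] ∨ ∃ r, tail = '\n' :: r) →
      pref.isPrefixOf (D ++ tail) = pref.isPrefixOf D := by
  induction pref with
  | nil => intro D tail _ _; simp [List.isPrefixOf]
  | cons p ps ih =>
    intro D tail hD ht
    cases D with
    | nil =>
      simp only [List.nil_append]
      rcases ht with h | ⟨r, h⟩ <;> subst h
      · rfl
      · simp only [List.isPrefixOf]
        have : p ≠ '\n' := fun h => hn (h ▸ List.mem_cons_self)
        simp [beq_iff_eq, this]
    | cons d ds =>
      have hn' : '\n' ∉ ps := fun h => hn (List.mem_cons_of_mem _ h)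
      have hD' : '\n' ∉ ds := fun h => hD (List.mem_cons_of_mem _ h)
      simp only [List.cons_append, List.isPrefixOf]
      rw [ih hn' ds tail hD' ht]

theorem dropWhile_congr' {p q : Char → Bool} :
    ∀ (l : List Char), (∀ x ∈ l, p x = q x) → l.dropWhile p = l.dropWhile q := by
  intro l h
  induction l with
  | nil => rfl
  | cons a l ih =>
    have ha := h a List.mem_cons_self
    simp only [List.dropWhile_cons, ha]
    split <;> [exact ih fun x hx => h x (List.mem_cons_of_mem _ hx); rfl]

theorem takeWhile_congr' {p q : Char → Bool} :
    ∀ (l : List Char), (∀ x ∈ l, p x = q x) → l.takeWhile p = l.takeWhile q := by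
  intro l h
  induction l with
  | nil => rfl
  | cons a l ih =>
    have ha := h a List.mem_cons_self
    simp only [List.takeWhile_cons, ha]
    split <;> simp [ih fun x hx => h x (List.mem_cons_of_mem _ hx)]

theorem dropWhile_append_all {p : Char → Bool} (a b : List Char) (h : ∀ x ∈ a, p x = true) :
    (a ++ b).dropWhile p = b.dropWhile p := by
  induction a with
  | nil => rfl
  | cons x a ih =>
    simp only [List.cons_append, List.dropWhile_cons, h x List.mem_cons_self]
    exact ih fun y hy => h y (List.mem_cons_of_mem _ hy)

-- within the domain, Python str.strip's leading-whitespace class on a newline-free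
-- string is exactly Source B's ' \t\r'
theorem char_toNat_inj {c d : Char} (h : c.toNat = d.toNat) : c = d := by
  unfold Char.toNat at h
  exact Char.ext (UInt32.toNat_inj.mp h)

theorem beq_eq_decide_toNat (c d : Char) : (c == d) = decide (c.toNat = d.toNat) := by
  by_cases h : c = d
  · subst h; simp
  · have h2 : c.toNat ≠ d.toNat := fun he => h (char_toNat_inj he)
    simp [h, h2]

theorem isspace_eq_wsB (c : Char) (hd : pvDomChar c = true) (hn : c ≠ '\n') :
    PySem.Chars.isspace c = wsB c := by
  have h10 : c.toNat ≠ 10 := fun h => hn (char_toNat_inj (by rw [h]; rfl))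
  simp only [pvDomChar, Bool.or_eq_true, Bool.and_eq_true, decide_eq_true_eq, beq_iff_eq] at hd
  rw [Bool.eq_iff_iff]
  simp only [PySem.Chars.isspace, wsB, beq_eq_decide_toNat, Bool.or_eq_true, Bool.and_eq_true,
    decide_eq_true_eq]
  have e1 : (' ' : Char).toNat = 32 := rfl
  have e2 : ('\t' : Char).toNat = 9 := rfl
  have e3 : ('\r' : Char).toNat = 13 := rfl
  rw [e1, e2, e3]
  omega

theorem rstrip_prefix_iff (pref D : List Char) (hne : pref ≠ [])
    (hlast : PySem.Chars.isspace (pref.getLast hne) = false) :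
    pref.isPrefixOf (PySem.Chars.rstrip D) = pref.isPrefixOf D := by
  have hpr : List.dropWhile PySem.Chars.isspace pref.reverse = pref.reverse := by
    cases hgl : pref.reverse with
    | nil => simp at hgl; exact absurd hgl hne
    | cons a t =>
      have hrne : pref.reverse ≠ [] := by simp [hgl]
      have ha : pref.getLast hne = a := by
        rw [List.getLast_eq_head_reverse]
        simp only [hgl, List.head_cons]
      rw [List.dropWhile_cons, ← ha, hlast]
      simp
  rw [Bool.eq_iff_iff]
  simp only [List.isPrefixOf_iff_prefix]
  constructor
  · intro h
    refine h.trans ?_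
    unfold PySem.Chars.rstrip
    have h1 : List.dropWhile PySem.Chars.isspace D.reverse <:+ D.reverse := List.dropWhile_suffix _
    have h2 := List.reverse_prefix.mpr h1
    rwa [List.reverse_reverse] at h2
  · rintro ⟨u, rfl⟩
    unfold PySem.Chars.rstrip
    rw [List.reverse_append, List.dropWhile_append]
    split
    · rw [hpr, List.reverse_reverse]
    · rw [List.reverse_append, List.reverse_reverse]
      exact ⟨_, rfl⟩

theorem dropWhile_head_false {p : Char → Bool} :
    ∀ {l a : List Char} {x : Char}, l.dropWhile p = x :: a → p x = false := by
  intro l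
  induction l with
  | nil => intro a x h; simp at h
  | cons c t ih =>
    intro a x h
    rw [List.dropWhile_cons] at h
    split at h
    · exact ih h
    · cases h; simp_all

theorem wsB_ne_eq (x : Char) (h : wsB x = true) : (x != '=') = true := by
  simp only [wsB, Bool.or_eq_true, beq_iff_eq] at h
  rcases h with (h | h) | h <;> subst h <;> decide

set_option maxRecDepth 8192 in
theorem tryLine_eq (L tail : List Char) (hn : '\n' ∉ L) (hd : L.all pvDomChar = true)
    (ht : tail = [] ∨ ∃ r, tail = '\n' :: r) :
    tryLineB (L ++ tail) = lineA L := by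
  have hdomL : ∀ x ∈ L, pvDomChar x = true := by
    simpa [List.all_eq_true] using hd
  -- step 1: the whitespace skip ignores the rest of the string
  have hwD : (L ++ tail).dropWhile wsB = L.dropWhile wsB ++ tail := by
    rw [List.dropWhile_append]
    split <;> rename_i hemp
    · rw [List.isEmpty_iff] at hemp
      rw [hemp, List.nil_append]
      rcases ht with h | ⟨r, h⟩ <;> subst h
      · rfl
      · have hw : wsB '\n' = false := by decide
        rw [List.dropWhile_cons, hw]; simp
    · rfl
  -- step 2: within the domain, lstrip is the ' \t\r' skip
  have hlsp : L.dropWhile PySem.Chars.isspace = L.dropWhile wsB :=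
    dropWhile_congr' L (fun x hx =>
      isspace_eq_wsB x (hdomL x hx) (fun he => hn (he ▸ hx)))
  have hguard : PySem.Chars.startswith (PySem.Chars.strip L) "fileExtensions".toList =
      "fileExtensions".toList.isPrefixOf (L.dropWhile wsB) := by
    unfold PySem.Chars.startswith PySem.Chars.strip PySem.Chars.lstrip
    rw [hlsp, rstrip_prefix_iff _ _ (by decide) (by decide)]
  have hnD : ('\n' : Char) ∉ L.dropWhile wsB := fun hx =>
    hn ((List.dropWhile_sublist _).subset hx)
  have hguard2 : "fileExtensions".toList.isPrefixOf (L.dropWhile wsB ++ tail) =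
      "fileExtensions".toList.isPrefixOf (L.dropWhile wsB) :=
    prefix_append_stop _ (by decide) _ tail hnD ht
  unfold tryLineB lineA
  rw [hwD, hguard2, hguard]
  by_cases hg : "fileExtensions".toList.isPrefixOf (L.dropWhile wsB) = true
  swap
  · rw [Bool.not_eq_true] at hg
    rw [hg]
    simp
  rw [hg]
  simp only [if_true]
  obtain ⟨u, hu⟩ := List.isPrefixOf_iff_prefix.mp hg
  have hlen14 : ("fileExtensions".toList : List Char).length = 14 := by decide
  have hdrop : (L.dropWhile wsB ++ tail).drop 14 = u ++ tail := by
    rw [← hu, List.append_assoc, ← hlen14, List.drop_left]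
  rw [hdrop]
  have hnu : ('\n' : Char) ∉ u := fun hx => hnD (hu ▸ List.mem_append_right _ hx)
  have hstopu : ∀ x ∈ u, (!stopB x) = (x != '=') := by
    intro x hx
    have hxn : (x == '\n') = false := by
      simp only [beq_eq_false_iff_ne, ne_eq]
      exact fun he => hnu (he ▸ hx)
    simp [stopB, hxn, bne]
  have hudrop : u.dropWhile (fun c => !stopB c) = u.dropWhile (fun c => c != '=') :=
    dropWhile_congr' u hstopu
  -- A's first '=' in the line is B's first '=' after the keyword
  have hLsplit : L = (L.takeWhile wsB ++ "fileExtensions".toList) ++ u := by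
    rw [List.append_assoc, hu, List.takeWhile_append_dropWhile]
  have hallne : ∀ x ∈ L.takeWhile wsB ++ "fileExtensions".toList, (x != '=') = true := by
    intro x hx
    rcases List.mem_append.mp hx with h | h
    · exact wsB_ne_eq x (List.mem_takeWhile_imp h)
    · have hall : ("fileExtensions".toList.all (fun x => x != '=')) = true := by decide
      exact List.all_eq_true.mp hall x h
  have hLdrop : L.dropWhile (fun c => c != '=') = u.dropWhile (fun c => c != '=') := by
    conv_lhs => rw [hLsplit]
    exact dropWhile_append_all _ _ hallne
  rw [splitOn_eq]
  cases hdu : u.dropWhile (fun c => c != '=') with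
  | nil =>
    have hLd : L.dropWhile (fun c => c != '=') = [] := hLdrop.trans hdu
    rw [splitC_of_dropWhile_nil _ _ hLd]
    rw [List.dropWhile_append, hudrop, hdu]
    simp only [List.isEmpty_nil, if_true]
    rcases ht with h | ⟨r, h⟩ <;> subst h
    · simp
    · have hs : (!stopB '\n') = false := by decide
      rw [List.dropWhile_cons, hs]
      simp
  | cons a v =>
    have ha : a = '=' := by
      have := dropWhile_head_false hdu
      simpa [bne] using this
    subst ha
    have hLd : L.dropWhile (fun c => c != '=') = ['='] ++ v := by
      rw [hLdrop, hdu]; rfl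
    rw [splitC_of_dropWhile_cons _ _ _ _ hLd rfl]
    rw [splitC_cons_shape '=' v]
    rw [List.dropWhile_append, hudrop, hdu]
    simp only [List.isEmpty_cons, Bool.false_eq_true, if_false, List.cons_append]
    have hnv : ('\n' : Char) ∉ v := fun hx =>
      hnu ((List.dropWhile_sublist _).subset (hdu ▸ List.mem_cons_of_mem _ hx))
    have hstopv : ∀ x ∈ v, (!stopB x) = (x != '=') := by
      intro x hx
      have hxn : (x == '\n') = false := by
        simp only [beq_eq_false_iff_ne, ne_eq]
        exact fun he => hnv (he ▸ hx)
      simp [stopB, hxn, bne]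
    have hcap : (v ++ tail).takeWhile (fun c => !stopB c) = v.takeWhile (fun c => c != '=') := by
      rw [List.takeWhile_append]
      split <;> rename_i hlv
      · have hv : v.takeWhile (fun c => !stopB c) = v :=
          List.IsPrefix.eq_of_length (List.takeWhile_prefix _) hlv
        have hv' : v.takeWhile (fun c => c != '=') = v := by
          rw [← takeWhile_congr' v hstopv, hv]
        rw [hv']
        rcases ht with h | ⟨r, h⟩ <;> subst h
        · simp
        · have hs : (!stopB '\n') = false := by decide
          rw [List.takeWhile_cons, hs]
          simp
      · exact takeWhile_congr' v hstopv
    rw [hcap]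
    simp

theorem mainEq_aux : ∀ (n : Nat) (cs : List Char), cs.length ≤ n → cs.all pvDomChar = true →
    goA (splitC '\n' cs) =
      (scanB cs).map (fun v => PySem.Chars.stripChars (PySem.Chars.strip v) ['"']) := by
  intro n
  induction n with
  | zero =>
    intro cs hlen hdom
    have : cs = [] := List.length_eq_zero_iff.mp (Nat.le_zero.mp hlen)
    subst this
    rw [scanB]
    rw [splitC_of_dropWhile_nil '\n' [] rfl]
    rfl
  | succ n ih =>
    intro cs hlen hdom
    have hnL : ('\n' : Char) ∉ cs.takeWhile (fun c => c != '\n') := by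
      intro hx
      have := List.mem_takeWhile_imp hx
      simp at this
    have hdomL : (cs.takeWhile (fun c => c != '\n')).all pvDomChar = true := by
      rw [List.all_eq_true] at hdom ⊢
      exact fun x hx => hdom x ((List.takeWhile_sublist _).subset hx)
    rw [scanB]
    cases hdw : cs.dropWhile (fun c => c != '\n') with
    | nil =>
      have hcs : cs.takeWhile (fun c => c != '\n') = cs := by
        conv_rhs => rw [← List.takeWhile_append_dropWhile (p := fun c => c != '\n') (l := cs)]
        rw [hdw, List.append_nil]
      rw [splitC_of_dropWhile_nil '\n' cs hdw]
      have htl := tryLine_eq (cs.takeWhile (fun c => c != '\n')) [] hnL hdomL (Or.inl rfl)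
      rw [hcs, List.append_nil] at htl
      rw [goA_cons, hcs, htl]
      cases hl : lineA cs <;> simp [hl, hdw, goA]
    | cons x r =>
      have hx : x = '\n' := by
        have := dropWhile_head_false hdw
        simpa using this
      subst hx
      have hcs : cs.takeWhile (fun c => c != '\n') ++ ('\n' :: r) = cs := by
        conv_rhs => rw [← List.takeWhile_append_dropWhile (p := fun c => c != '\n') (l := cs)]
        rw [hdw]
      rw [splitC_of_dropWhile_cons '\n' cs ['\n'] r (by simpa using hdw) rfl]
      have htl := tryLine_eq (cs.takeWhile (fun c => c != '\n')) ('\n' :: r) hnL hdomL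
        (Or.inr ⟨r, rfl⟩)
      rw [hcs] at htl
      rw [htl, goA_cons]
      have hrlen : r.length ≤ n := by
        have h1 : ('\n' :: r).length ≤ cs.length := by
          rw [← hdw]; exact (List.dropWhile_sublist _).length_le
        simp at h1; omega
      have hrdom : r.all pvDomChar = true := by
        rw [List.all_eq_true] at hdom ⊢
        intro x hx
        refine hdom x ?_
        rw [← hcs]
        exact List.mem_append_right _ (List.mem_cons_of_mem _ hx)
      cases hl : lineA (cs.takeWhile (fun c => c != '\n')) with
      | some p => simp [hl, hdw]
      | none =>
        simp only [hl, hdw]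
        exact ih r hrlen hrdom

theorem mainEq : ∀ (cs : List Char), cs.all pvDomChar = true →
    goA (splitC '\n' cs) =
      (scanB cs).map (fun v => PySem.Chars.stripChars (PySem.Chars.strip v) ['"']) :=
  fun cs hdom => mainEq_aux cs.length cs (Nat.le_refl _) hdom

-- ===== VERDICT (by name: the statement is the Claim_ definition above) =====
theorem extract_extension_from_mwe2_spec : Claim_equal_extract_extension_from_mwe2 := by
  intro content hdom
  unfold Spec_extract_extension_from_mwe2 extract_extension_from_mwe2 extract_extension_from_mwe2_alt
  rw [splitOn_eq, mainEq content.toList hdom]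
  cases scanB content.toList <;> simp
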